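-- pv_equiv track=rewrite | github.com/angelhwei/genomeVis | backEndPython/compare.py | compare_genomes
-- ===== SOURCE A (Python) =====
-- def compare_genomes(genome1, genome2):
--     if len(genome1) != len(genome2):
--         raise ValueError("Genome sequences are of different lengths")
--
--     differences = []
--     in_diff = False
--     diff_start = None
--     for i in range(len(genome1)):
--         if genome1[i] != genome2[i]:
--             if not in_diff:
--                 diff_start = i
--                 in_diff = True
--         else:
--             if in_diff:
--                 differences.append((diff_start, i-1))
--                 in_diff = False
--                 diff_start = None
--
--     if in_diff:
--         differences.append((diff_start, len(genome1)-1))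
--
--     return differences
-- ===== SOURCE B (Python) =====
-- def compare_genomes(genome1, genome2):
--     if len(genome1) != len(genome2):
--         raise ValueError("Genome sequences are of different lengths")
--     diffs = [i for i, (a, b) in enumerate(zip(genome1, genome2)) if a != b]
--     out = []
--     for i in diffs:
--         if out and out[-1][1] == i - 1:
--             out[-1] = (out[-1][0], i)
--         else:
--             out.append((i, i))
--     return out
-- ===== Notes on version B (the rewrite author's own statement) =====
-- stated objective: alternative
-- what changed: Replaces A's in_diff/diff_start state machine with a two-phase decomposition: first collect all differing indices, then merge runs of consecutive indices into inclusive intervals.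
import Mathlib
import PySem

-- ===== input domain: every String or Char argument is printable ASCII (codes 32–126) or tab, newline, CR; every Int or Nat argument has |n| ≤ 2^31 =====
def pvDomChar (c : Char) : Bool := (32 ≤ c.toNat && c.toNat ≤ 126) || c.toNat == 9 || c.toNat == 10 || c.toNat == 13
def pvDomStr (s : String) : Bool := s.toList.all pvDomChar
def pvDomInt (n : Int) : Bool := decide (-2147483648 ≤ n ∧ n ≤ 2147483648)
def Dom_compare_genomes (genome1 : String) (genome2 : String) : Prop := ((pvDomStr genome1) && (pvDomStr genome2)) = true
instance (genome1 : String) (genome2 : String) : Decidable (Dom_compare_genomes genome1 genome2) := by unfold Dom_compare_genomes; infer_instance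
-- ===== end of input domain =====

-- B replaces A's in_diff/diff_start state machine by a two-phase decomposition
-- (collect differing indices, then merge consecutive-index runs); same O(n) cost.


-- ===== PORT A =====
-- A's loop `for i in range(len(genome1))` indexing genome1[i]/genome2[i] is ported
-- as the obvious structural recursion walking the two character lists in step with
-- the counter i (exact on equal-length inputs; on unequal lengths A raises, which
-- Pre_ excludes).  State is exactly A's (differences, in_diff, diff_start); at the
-- final step i = len(genome1), so A's `len(genome1)-1` is `i - 1` there.
def pvALoop : List Char → List Char → Int → List (Int × Int) → Bool → Option Int → List (Int × Int)
  | a :: t1, b :: t2, i, diffs, inDiff, start =>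
      if a ≠ b then
        if ¬ inDiff then pvALoop t1 t2 (i + 1) diffs true (some i)
        else pvALoop t1 t2 (i + 1) diffs inDiff start
      else
        if inDiff then pvALoop t1 t2 (i + 1) (diffs ++ [(start.getD 0, i - 1)]) false none
        else pvALoop t1 t2 (i + 1) diffs inDiff start
  | _, _, i, diffs, inDiff, start =>
      if inDiff then diffs ++ [(start.getD 0, i - 1)] else diffs

def compare_genomes (genome1 : String) (genome2 : String) : List (Int × Int) :=
  if genome1.toList.length ≠ genome2.toList.length then []  -- Python raises ValueError here (outside Pre_)
  else pvALoop genome1.toList genome2.toList 0 [] false none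

-- ===== PORT B =====
-- phase 1: the differing indices (B's comprehension over enumerate(zip(...)))
def pvDiffIdx : List Char → List Char → Int → List Int
  | a :: t1, b :: t2, i => if a ≠ b then i :: pvDiffIdx t1 t2 (i + 1) else pvDiffIdx t1 t2 (i + 1)
  | _, _, _ => []

-- phase 2: one merge step of B's loop body (`if out and out[-1][1] == i - 1: …`)
def pvMerge (out : List (Int × Int)) (i : Int) : List (Int × Int) :=
  match out.getLast? with
  | some (s, e) => if e = i - 1 then out.dropLast ++ [(s, i)] else out ++ [(i, i)]
  | none => out ++ [(i, i)]

def compare_genomes_alt (genome1 : String) (genome2 : String) : List (Int × Int) :=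
  if genome1.toList.length ≠ genome2.toList.length then []  -- B raises ValueError here (outside Pre_)
  else (pvDiffIdx genome1.toList genome2.toList 0).foldl pvMerge []

-- ===== PRECONDITION & SPEC =====
-- Pre_ excludes exactly the inputs of unequal length, where A raises ValueError.
def Pre_compare_genomes (genome1 : String) (genome2 : String) : Prop :=
  genome1.toList.length = genome2.toList.length
instance (genome1 : String) (genome2 : String) : Decidable (Pre_compare_genomes genome1 genome2) := by unfold Pre_compare_genomes; infer_instance
def pvWitness_compare_genomes : String × String := ("ACGT", "AGGA")

def Spec_compare_genomes (genome1 : String) (genome2 : String) (out : List (Int × Int)) : Prop := out = compare_genomes_alt genome1 genome2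
instance (genome1 : String) (genome2 : String) (out : List (Int × Int)) : Decidable (Spec_compare_genomes genome1 genome2 out) := by unfold Spec_compare_genomes; infer_instance

-- ===== CLAIM (what is proved, stated in full; the proofs are below) =====
def Claim_equal_compare_genomes : Prop := ∀ (genome1 : String) (genome2 : String), Dom_compare_genomes genome1 genome2 → Pre_compare_genomes genome1 genome2 → Spec_compare_genomes genome1 genome2 (compare_genomes genome1 genome2)

-- ===== LEMMAS AND PROOFS =====

-- Invariant: when in_diff is false, every interval already in `diffs` ends at most
-- at i-2, so B's merge step never fuses across an equal position.
theorem pvKey : ∀ (c1 c2 : List Char) (i : Int) (diffs : List (Int × Int)) (inDiff : Bool) (start : Option Int),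
    (inDiff = false → ∀ s e, diffs.getLast? = some (s, e) → e ≤ i - 2) →
    pvALoop c1 c2 i diffs inDiff start =
      List.foldl pvMerge (if inDiff then diffs ++ [(start.getD 0, i - 1)] else diffs)
        (pvDiffIdx c1 c2 i) := by
  intro c1
  induction c1 with
  | nil =>
      intro c2 i diffs inDiff start _
      cases inDiff <;> simp [pvALoop, pvDiffIdx]
  | cons a t1 ih =>
      intro c2 i diffs inDiff start hinv
      cases c2 with
      | nil => cases inDiff <;> simp [pvALoop, pvDiffIdx]
      | cons b t2 =>
          by_cases hab : a = b
          · -- equal characters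
            cases inDiff with
            | false =>
                simp only [pvALoop, pvDiffIdx, hab, ne_eq, not_true_eq_false,
                  Bool.false_eq_true, if_false]
                rw [ih t2 (i + 1) diffs false start
                  (fun _ s e he => by have := hinv rfl s e he; omega)]
                simp
            | true =>
                simp only [pvALoop, pvDiffIdx, hab, ne_eq, not_true_eq_false, if_false, ite_true]
                rw [ih t2 (i + 1) (diffs ++ [(start.getD 0, i - 1)]) false none]
                · simp
                · intro _ s e he
                  simp [List.getLast?_append] at he
                  omega
          · -- differing characters
            cases inDiff with
            | false =>
                have hm : pvMerge diffs i = diffs ++ [(i, i)] := by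
                  unfold pvMerge
                  cases hl : diffs.getLast? with
                  | none => simp
                  | some p =>
                      obtain ⟨s, e⟩ := p
                      have := hinv rfl s e hl
                      have hne : e ≠ i - 1 := by omega
                      simp [hne]
                simp only [pvALoop, pvDiffIdx, hab, ne_eq, not_false_eq_true, if_true,
                  Bool.false_eq_true, ite_false, List.foldl_cons, hm]
                rw [ih t2 (i + 1) diffs true (some i) (by intro h; cases h)]
                norm_num
            | true =>
                have hm : pvMerge (diffs ++ [(start.getD 0, i - 1)]) i
                    = diffs ++ [(start.getD 0, i)] := by
                  unfold pvMerge
                  simp [List.getLast?_append]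
                simp only [pvALoop, pvDiffIdx, hab, ne_eq, not_false_eq_true, if_true,
                  not_true_eq_false, ite_false, List.foldl_cons, hm]
                rw [ih t2 (i + 1) diffs true start (by intro h; cases h)]
                norm_num

-- ===== VERDICT (by name: the statement is the Claim_ definition above) =====
theorem compare_genomes_spec : Claim_equal_compare_genomes := by
  intro g1 g2 _ hpre
  unfold Spec_compare_genomes compare_genomes compare_genomes_alt
  rw [if_neg (by exact fun h => h hpre), if_neg (by exact fun h => h hpre)]
  exact pvKey g1.toList g2.toList 0 [] false none (by intro _ s e he; cases he)
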